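-- pv_equiv track=rewrite | github.com/cdsl-research/g2122003_log_search | store/No3_index_ver5.py | merge_indices
-- ===== SOURCE A (Python) =====
-- def merge_indices(results):
--     # 結果をマージする関数
--     normally_index = {}
--     abnormally_index = {}
--
--     for n_idx, ab_idx in results:
--         # normally_indexをマージ
--         for key, files in n_idx.items():
--             if key not in normally_index:
--                 normally_index[key] = {}
--             for file, offsets in files.items():
--                 if file not in normally_index[key]:
--                     normally_index[key][file] = []
--                 normally_index[key][file].extend(offsets)
--
--         # abnormally_indexをマージ
--         for key, files in ab_idx.items():
--             if key not in abnormally_index: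
--                 abnormally_index[key] = {}
--             for file, offsets in files.items():
--                 if file not in abnormally_index[key]:
--                     abnormally_index[key][file] = []
--                 abnormally_index[key][file].extend(offsets)
--
--     return normally_index, abnormally_index
-- ===== SOURCE B (Python) =====
-- def merge_indices(results):
--     # Staged group-by instead of incremental dict merging: flatten each side to a
--     # stream of (key, files) pairs and (key, file, offsets) triples, then rebuild
--     # the merged index by first-occurrence grouping with comprehensions.
--     def build(indices):
--         pairs = [(k, fs) for idx in indices for k, fs in idx.items()]
--         triples = [(k, f, offs) for k, fs in pairs for f, offs in fs.items()]
--         keys = list(dict.fromkeys(k for k, _ in pairs))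
--         return {
--             k: {
--                 f: [o for k2, f2, offs in triples if k2 == k and f2 == f for o in offs]
--                 for f in dict.fromkeys(f2 for k2, f2, _ in triples if k2 == k)
--             }
--             for k in keys
--         }
--     return build([n for n, _ in results]), build([ab for _, ab in results])
-- ===== Notes on version B (the rewrite author's own statement) =====
-- stated objective: alternative
-- what changed: Replaces A's single-pass incremental merge into mutable nested dicts by staged passes: flatten both sides to (key,files) pair and (key,file,offsets) triple streams, then rebuild each merged index by first-occurrence group-by comprehensions (filter + concatenate per key/file).
import Mathlib
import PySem

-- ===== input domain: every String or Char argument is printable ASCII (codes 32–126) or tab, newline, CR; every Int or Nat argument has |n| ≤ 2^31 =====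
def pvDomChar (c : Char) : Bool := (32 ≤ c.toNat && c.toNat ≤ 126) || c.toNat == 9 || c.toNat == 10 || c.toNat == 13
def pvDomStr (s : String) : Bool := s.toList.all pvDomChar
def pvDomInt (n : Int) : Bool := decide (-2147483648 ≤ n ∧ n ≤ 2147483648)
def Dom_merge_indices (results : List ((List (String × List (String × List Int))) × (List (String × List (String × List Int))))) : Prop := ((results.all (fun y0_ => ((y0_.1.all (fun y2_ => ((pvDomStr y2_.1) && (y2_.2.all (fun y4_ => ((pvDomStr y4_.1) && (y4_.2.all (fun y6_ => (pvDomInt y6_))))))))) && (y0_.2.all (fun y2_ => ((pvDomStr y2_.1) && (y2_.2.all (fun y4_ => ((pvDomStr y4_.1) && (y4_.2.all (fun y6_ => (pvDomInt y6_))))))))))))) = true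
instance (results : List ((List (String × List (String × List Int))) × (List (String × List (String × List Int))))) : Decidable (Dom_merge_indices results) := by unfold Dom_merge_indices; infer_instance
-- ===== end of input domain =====

-- B rebuilds each merged index by staged flatten-then-group-by passes instead of A's
-- single-pass incremental merge into nested dicts (objective: alternative, same results).

-- ===== PORT A =====
-- A's per-result merge of one index dict into the accumulator (the hand-unrolled nested loops).
def mergeA_one (acc : PySem.Dict String (PySem.Dict String (List Int)))
    (idx : List (String × List (String × List Int))) :
    PySem.Dict String (PySem.Dict String (List Int)) :=
  idx.foldl (fun acc kf =>
    let key := kf.1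
    let acc := if acc.contains key then acc else acc.insert key PySem.Dict.empty
    kf.2.foldl (fun acc fo =>
      let file := fo.1
      let inner := acc.getD key PySem.Dict.empty
      let acc := if inner.contains file then acc
                 else acc.insert key (inner.insert file [])
      let inner2 := acc.getD key PySem.Dict.empty
      acc.insert key (inner2.insert file (inner2.getD file [] ++ fo.2))) acc) acc

def merge_indices (results : List ((List (String × List (String × List Int))) × (List (String × List (String × List Int))))) : (List (String × List (String × List Int))) × (List (String × List (String × List Int))) :=
  let r := results.foldl
    (fun st p => (mergeA_one st.1 p.1, mergeA_one st.2 p.2))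
    (PySem.Dict.empty, PySem.Dict.empty)
  (r.1.items.map (fun kv => (kv.1, kv.2.items)),
   r.2.items.map (fun kv => (kv.1, kv.2.items)))

-- ===== PORT B =====
-- Source B's build(): pairs and triples streams, then group-by comprehensions.
-- (The dict comprehensions range over dict.fromkeys lists, whose entries are distinct,
-- so each comprehension's assoc list is exactly the map over those entries.)
def buildB (indices : List (List (String × List (String × List Int)))) :
    List (String × List (String × List Int)) :=
  let pairs := indices.flatMap (fun idx => idx)
  let triples := pairs.flatMap (fun kf => kf.2.map (fun fo => (kf.1, fo.1, fo.2)))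
  let keys := PySem.List.dedup (pairs.map (fun p => p.1))
  keys.map (fun k =>
    (k, (PySem.List.dedup ((triples.filter (fun t => t.1 == k)).map (fun t => t.2.1))).map
        (fun f => (f, (triples.filter (fun t => t.1 == k && t.2.1 == f)).flatMap (fun t => t.2.2)))))

def merge_indices_alt (results : List ((List (String × List (String × List Int))) × (List (String × List (String × List Int))))) : (List (String × List (String × List Int))) × (List (String × List (String × List Int))) :=
  (buildB (results.map (fun p => p.1)), buildB (results.map (fun p => p.2)))

-- ===== PRECONDITION & SPEC =====
def Spec_merge_indices (results : List ((List (String × List (String × List Int))) × (List (String × List (String × List Int))))) (out : (List (String × List (String × List Int))) × (List (String × List (String × List Int)))) : Prop := out = merge_indices_alt results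
instance (results : List ((List (String × List (String × List Int))) × (List (String × List (String × List Int))))) (out : (List (String × List (String × List Int))) × (List (String × List (String × List Int)))) : Decidable (Spec_merge_indices results out) := by unfold Spec_merge_indices; exact instDecidableEqProd _ _

-- ===== CLAIM (what is proved, stated in full; the proofs are below) =====
def Claim_equal_merge_indices : Prop := ∀ (results : List ((List (String × List (String × List Int))) × (List (String × List (String × List Int))))), Dom_merge_indices results → Spec_merge_indices results (merge_indices results)

-- ===== LEMMAS AND PROOFS =====

-- A's inner file-loop body, with its key fixed.
def stepFile (key : String) (acc : PySem.Dict String (PySem.Dict String (List Int)))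
    (fo : String × List Int) : PySem.Dict String (PySem.Dict String (List Int)) :=
  let file := fo.1
  let inner := acc.getD key PySem.Dict.empty
  let acc := if inner.contains file then acc
             else acc.insert key (inner.insert file [])
  let inner2 := acc.getD key PySem.Dict.empty
  acc.insert key (inner2.insert file (inner2.getD file [] ++ fo.2))

-- The clean merge of a file list into an inner dict, and of one (key, files) pair.
def foldFiles (m : PySem.Dict String (List Int)) (fs : List (String × List Int)) :
    PySem.Dict String (List Int) :=
  fs.foldl (fun m fo => m.insert fo.1 (m.getD fo.1 [] ++ fo.2)) m

def stepPair (d : PySem.Dict String (PySem.Dict String (List Int)))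
    (kf : String × List (String × List Int)) :
    PySem.Dict String (PySem.Dict String (List Int)) :=
  d.insert kf.1 (foldFiles (d.getD kf.1 PySem.Dict.empty) kf.2)

-- Re-inserting a key with the value it already maps to leaves a nodup-keyed dict unchanged.
theorem insert_get?_eq_self {nu : Type} (d : PySem.Dict String nu) (k : String) (v : nu)
    (hnd : d.keys.Nodup) (h : d.get? k = some v) : d.insert k v = d := by
  apply PySem.Dict.ext
  rw [PySem.Dict.items_insert_of_contains d v
      (by rw [PySem.Dict.contains_eq_isSome_get?, h]; rfl)]
  have hfix : ∀ p ∈ d.items, (if (p.1 == k) = true then (k, v) else p) = p := by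
    intro p hp
    by_cases hpk : p.1 = k
    · have hg : d.get? p.1 = some p.2 := PySem.Dict.get?_of_mem_items d (by exact hp) hnd
      rw [hpk] at hg
      rw [hg] at h
      simp only [hpk, beq_self_eq_true, if_true]
      exact Prod.ext hpk.symm (by injection h with h'; exact h'.symm)
    · simp [hpk]
  rw [List.map_congr_left hfix]; exact List.map_id _

-- One iteration of A's file loop, while `key` maps to `v`, is one clean insert.
theorem stepFile_eq (key : String) (acc : PySem.Dict String (PySem.Dict String (List Int)))
    (v : PySem.Dict String (List Int)) (fo : String × List Int)
    (hv : acc.get? key = some v) :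
    stepFile key acc fo = acc.insert key (v.insert fo.1 (v.getD fo.1 [] ++ fo.2)) := by
  have hgetD : acc.getD key PySem.Dict.empty = v := PySem.Dict.getD_of_get?_eq_some acc _ hv
  unfold stepFile
  by_cases hc : v.contains fo.1 = true
  · simp only [hgetD, hc, if_true]
  · have hc' : v.contains fo.1 = false := by
      cases h : v.contains fo.1
      · rfl
      · exact absurd h hc
    have hvD : v.getD fo.1 [] = [] := PySem.Dict.getD_of_not_contains v [] hc'
    simp only [hgetD, hc', Bool.false_eq_true, if_false]
    rw [PySem.Dict.getD_of_get?_eq_some _ PySem.Dict.empty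
          (PySem.Dict.get?_insert_self acc key (v.insert fo.1 [])),
        PySem.Dict.getD_insert_self, PySem.Dict.insert_insert_self,
        PySem.Dict.insert_insert_self, List.nil_append, hvD, List.nil_append]

-- A's inner file loop, run while `key` maps to `v` in a nodup-keyed acc, is one insert of `foldFiles v files`.
theorem innerA_eq (files : List (String × List Int)) :
    ∀ (acc : PySem.Dict String (PySem.Dict String (List Int))) (key : String)
      (v : PySem.Dict String (List Int)), acc.keys.Nodup → acc.get? key = some v →
    files.foldl (stepFile key) acc = acc.insert key (foldFiles v files) := by
  induction files with
  | nil =>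
    intro acc key v hnd hv
    simp only [List.foldl_nil, foldFiles]
    rw [insert_get?_eq_self acc key v hnd hv]
  | cons fo rest ih =>
    intro acc key v hnd hv
    simp only [List.foldl_cons]
    rw [stepFile_eq key acc v fo hv,
      ih _ key (v.insert fo.1 (v.getD fo.1 [] ++ fo.2)) (PySem.Dict.nodup_keys_insert _ _ _ hnd)
        (PySem.Dict.get?_insert_self _ _ _),
      PySem.Dict.insert_insert_self]
    rfl

theorem nodup_stepPair (d : PySem.Dict String (PySem.Dict String (List Int)))
    (kf : String × List (String × List Int)) (h : d.keys.Nodup) :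
    (stepPair d kf).keys.Nodup := PySem.Dict.nodup_keys_insert _ _ _ h

-- A's per-index merge is the fold of the clean pair step (on a nodup-keyed accumulator).
theorem oneA_eq (idx : List (String × List (String × List Int))) :
    ∀ (acc : PySem.Dict String (PySem.Dict String (List Int))), acc.keys.Nodup →
    mergeA_one acc idx = idx.foldl stepPair acc := by
  induction idx with
  | nil => intro acc _; rfl
  | cons kf rest ih =>
    intro acc hnd
    show mergeA_one (kf.2.foldl (stepFile kf.1)
        (if acc.contains kf.1 then acc else acc.insert kf.1 PySem.Dict.empty)) rest
      = rest.foldl stepPair (stepPair acc kf)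
    by_cases hc : acc.contains kf.1 = true
    · obtain ⟨v, hv⟩ : ∃ v, acc.get? kf.1 = some v := by
        rw [PySem.Dict.contains_eq_isSome_get?] at hc
        exact Option.isSome_iff_exists.mp hc
      simp only [hc, if_true]
      rw [innerA_eq kf.2 acc kf.1 v hnd hv]
      have hsp : stepPair acc kf = acc.insert kf.1 (foldFiles v kf.2) := by
        unfold stepPair
        rw [PySem.Dict.getD_of_get?_eq_some acc _ hv]
      rw [← hsp] at *
      exact ih _ (nodup_stepPair acc kf hnd)
    · have hc' : acc.contains kf.1 = false := by
        cases h : acc.contains kf.1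
        · rfl
        · exact absurd h hc
      simp only [hc', Bool.false_eq_true, if_false]
      rw [innerA_eq kf.2 (acc.insert kf.1 PySem.Dict.empty) kf.1 PySem.Dict.empty
            (PySem.Dict.nodup_keys_insert _ _ _ hnd) (PySem.Dict.get?_insert_self _ _ _),
          PySem.Dict.insert_insert_self]
      have hsp : stepPair acc kf = acc.insert kf.1 (foldFiles PySem.Dict.empty kf.2) := by
        unfold stepPair
        rw [PySem.Dict.getD_of_not_contains acc PySem.Dict.empty hc']
      rw [← hsp]
      exact ih _ (nodup_stepPair acc kf hnd)

-- Group-by characterisation of an insert-merge fold from the empty dict (used at both levels).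
theorem items_groupFold {σ ν : Type} (upd : ν → σ → ν) (init : ν) (l : List (String × σ)) :
    (l.foldl (fun d p => d.insert p.1 (upd (d.getD p.1 init) p.2)) PySem.Dict.empty).items
    = (PySem.List.dedup (l.map (fun p => p.1))).map
        (fun k => (k, ((l.filter (fun p => p.1 == k)).map (fun p => p.2)).foldl upd init)) := by
  induction l using List.reverseRecOn with
  | nil => rfl
  | append_singleton l p ih =>
    have hkeys : (l.foldl (fun d p => d.insert p.1 (upd (d.getD p.1 init) p.2))
        PySem.Dict.empty).keys = PySem.List.dedup (l.map (fun p => p.1)) := by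
      rw [PySem.Dict.keys_foldl_insert_key]
      simp [PySem.Set.update_nil_left, PySem.Dict.keys_empty]
    have hnd : (l.foldl (fun d p => d.insert p.1 (upd (d.getD p.1 init) p.2))
        PySem.Dict.empty).keys.Nodup := by
      rw [hkeys]; exact PySem.List.nodup_dedup _
    rw [List.foldl_append, List.foldl_cons, List.foldl_nil]
    set F := l.foldl (fun d p => d.insert p.1 (upd (d.getD p.1 init) p.2)) PySem.Dict.empty with hF
    have hvals : ∀ k, ((l ++ [p]).filter (fun q => q.1 == k)).map (fun q => q.2)
        = (l.filter (fun q => q.1 == k)).map (fun q => q.2)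
          ++ if p.1 == k then [p.2] else [] := by
      intro k
      rw [List.filter_append, List.map_append]
      congr 1
      by_cases h : p.1 = k <;> simp [h]
    by_cases hm : p.1 ∈ l.map (fun q => q.1)
    · -- key already present: insert replaces in place
      have hcon : F.contains p.1 = true := by
        rw [PySem.Dict.contains_iff_mem_keys, hkeys, PySem.List.mem_dedup]; exact hm
      have hmemK : p.1 ∈ PySem.List.dedup (l.map (fun q => q.1)) :=
        (PySem.List.mem_dedup _ _).mpr hm
      have hitem : (p.1, ((l.filter (fun q => q.1 == p.1)).map (fun q => q.2)).foldl upd init)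
          ∈ F.items := by
        rw [ih]
        exact List.mem_map.mpr ⟨p.1, hmemK, rfl⟩
      have hgetD : F.getD p.1 init
          = ((l.filter (fun q => q.1 == p.1)).map (fun q => q.2)).foldl upd init :=
        PySem.Dict.getD_of_mem_items F hitem hnd init
      rw [PySem.Dict.items_insert_of_contains F _ hcon, ih, hgetD]
      have hdk : PySem.List.dedup ((l ++ [p]).map (fun q => q.1))
          = PySem.List.dedup (l.map (fun q => q.1)) := by
        simp only [List.map_append, List.map_cons, List.map_nil,
          PySem.List.dedup_eq_ofList, PySem.Set.ofList_append_singleton]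
        exact PySem.Set.add_of_mem ((PySem.Set.mem_ofList _ _).mpr hm)
      rw [hdk, List.map_map]
      apply List.map_congr_left
      intro k hk
      by_cases hkp : k = p.1
      · subst hkp
        simp only [Function.comp, beq_self_eq_true, if_true]
        rw [hvals p.1, if_pos (by simp), List.foldl_append, List.foldl_cons, List.foldl_nil]
      · have : (k == p.1) = false := by simp [hkp]
        simp only [Function.comp, this, Bool.false_eq_true, if_false]
        rw [hvals k, if_neg (by simp [Ne.symm hkp]), List.append_nil]
    · -- new key: insert appends
      have hcon : F.contains p.1 = false := by
        rw [Bool.eq_false_iff]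
        intro h
        rw [PySem.Dict.contains_iff_mem_keys, hkeys, PySem.List.mem_dedup] at h
        exact hm h
      have hgetD : F.getD p.1 init = init := PySem.Dict.getD_of_not_contains F init hcon
      have hfilnil : l.filter (fun q => q.1 == p.1) = [] := by
        rw [List.filter_eq_nil_iff]
        intro q hq hq1
        exact hm (List.mem_map.mpr ⟨q, hq, by simpa using hq1⟩)
      rw [PySem.Dict.items_insert_of_not_contains F _ hcon, ih, hgetD]
      have hdk : PySem.List.dedup ((l ++ [p]).map (fun q => q.1))
          = PySem.List.dedup (l.map (fun q => q.1)) ++ [p.1] := by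
        simp only [List.map_append, List.map_cons, List.map_nil,
          PySem.List.dedup_eq_ofList, PySem.Set.ofList_append_singleton]
        exact PySem.Set.add_of_not_mem (fun h => hm ((PySem.Set.mem_ofList _ _).mp h))
      rw [hdk, List.map_append, List.map_cons, List.map_nil]
      congr 1
      · apply List.map_congr_left
        intro k hk
        have hkp : ¬ (p.1 == k) = true := by
          intro h
          have hk' : p.1 ∈ PySem.List.dedup (l.map (fun q => q.1)) := by
            rw [eq_of_beq h]; exact hk
          exact hm ((PySem.List.mem_dedup _ _).mp hk')
        rw [hvals k, if_neg hkp, List.append_nil]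
      · rw [hvals p.1, if_pos (by simp), hfilnil]
        simp

-- A fold of folds is a fold over the flattened list.
theorem foldl_foldl_flatMap {α β : Type} (f : β → α → β) (fss : List (List α)) :
    ∀ b : β, fss.foldl (fun b fs => fs.foldl f b) b = (fss.flatMap id).foldl f b := by
  induction fss with
  | nil => intro b; rfl
  | cons fs rest ih =>
    intro b
    rw [List.foldl_cons, List.flatMap_cons, List.foldl_append, ih]
    rfl

theorem foldl_append_nil {α : Type} (xs : List (List α)) :
    xs.foldl (fun acc x => acc ++ x) [] = xs.flatten := by
  simpa using PySem.List.foldl_append_eq_flatten (xs := xs) (acc := ([] : List α))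

-- The triples of `pairs` whose key is k are the triples of the pairs filtered at k.
theorem triples_filter_key (pairs : List (String × List (String × List Int))) (k : String) :
    ((pairs.flatMap (fun kf => kf.2.map (fun fo => (kf.1, fo.1, fo.2)))).filter
        (fun t => t.1 == k))
    = ((pairs.filter (fun p => p.1 == k)).flatMap (fun p => p.2)).map
        (fun fo => (k, fo.1, fo.2)) := by
  induction pairs with
  | nil => rfl
  | cons q ps ih =>
    rw [List.flatMap_cons, List.filter_append, List.filter_cons]
    by_cases h : q.1 = k
    · subst h
      simp only [beq_self_eq_true, if_true, List.flatMap_cons, List.map_append]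
      rw [ih]
      congr 1
      rw [List.filter_map]
      have : ((fun (t : String × String × List Int) => t.1 == q.1) ∘
          (fun (fo : String × List Int) => (q.1, fo))) = fun _ => (q.1 == q.1) := rfl
      rw [this]
      simp
    · have hb : (q.1 == k) = false := by simp [h]
      simp only [hb, Bool.false_eq_true, if_false]
      rw [ih, List.filter_map]
      have : ((fun (t : String × String × List Int) => t.1 == k) ∘
          (fun (fo : String × List Int) => (q.1, fo))) = fun _ => (q.1 == k) := rfl
      rw [this]
      simp [hb]

-- One merged side: the stepPair fold over the flattened pair stream, rendered as
-- nested assoc lists, is exactly Source B's staged group-by rebuild.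
theorem side_eq (indices : List (List (String × List (String × List Int)))) :
    (((indices.flatMap (fun idx => idx)).foldl stepPair PySem.Dict.empty).items.map
      (fun kv => (kv.1, kv.2.items))) = buildB indices := by
  unfold buildB
  set pairs := indices.flatMap (fun idx => idx) with hp
  have h1 : pairs.foldl stepPair PySem.Dict.empty
      = pairs.foldl (fun d p => d.insert p.1 (foldFiles (d.getD p.1 PySem.Dict.empty) p.2))
          PySem.Dict.empty := rfl
  rw [h1, items_groupFold foldFiles PySem.Dict.empty pairs, List.map_map]
  apply List.map_congr_left
  intro k hk
  simp only [Function.comp]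
  congr 1
  -- inner dict of key k
  set fsAll := (pairs.filter (fun p => p.1 == k)).flatMap (fun p => p.2) with hfs
  have h2 : ((pairs.filter (fun p => p.1 == k)).map (fun p => p.2)).foldl foldFiles
        PySem.Dict.empty
      = fsAll.foldl (fun m fo => m.insert fo.1 (m.getD fo.1 [] ++ fo.2)) PySem.Dict.empty := by
    have := foldl_foldl_flatMap (fun m (fo : String × List Int) =>
        m.insert fo.1 (m.getD fo.1 [] ++ fo.2)) ((pairs.filter (fun p => p.1 == k)).map (fun p => p.2))
        (PySem.Dict.empty : PySem.Dict String (List Int))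
    rw [List.flatMap_map] at this
    exact this
  rw [h2, items_groupFold (fun (v : List Int) (o : List Int) => v ++ o) [] fsAll]
  -- now match B's comprehension for key k
  rw [triples_filter_key pairs k, List.map_map]
  have hfst : ((fun t : String × String × List Int => t.2.1) ∘
      (fun fo : String × List Int => (k, fo.1, fo.2))) = fun fo => fo.1 := rfl
  rw [hfst]
  apply List.map_congr_left
  intro f hf
  congr 1
  -- offsets for (k, f)
  have h3 : (pairs.flatMap (fun kf => kf.2.map (fun fo => (kf.1, fo.1, fo.2)))).filter
        (fun t => t.1 == k && t.2.1 == f)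
      = (fsAll.filter (fun fo => fo.1 == f)).map (fun fo => (k, fo.1, fo.2)) := by
    have hcomm : (fun t : String × String × List Int => t.1 == k && t.2.1 == f)
        = fun t => t.2.1 == f && t.1 == k := by
      funext t; exact Bool.and_comm _ _
    rw [hcomm, ← List.filter_filter, triples_filter_key pairs k, List.filter_map]
    have : ((fun t : String × String × List Int => t.2.1 == f) ∘
        (fun fo : String × List Int => (k, fo.1, fo.2))) = fun fo => fo.1 == f := rfl
    rw [this]
  rw [h3, List.flatMap_map]
  show List.foldl (fun v o => v ++ o) []
      ((fsAll.filter (fun p => p.1 == f)).map (fun p => p.2))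
    = (fsAll.filter (fun p => p.1 == f)).flatMap (fun p => p.2)
  rw [foldl_append_nil, ← List.flatMap_def]

-- A's loop over `results` with its pair of accumulators is two independent folds.
theorem fold_results_split (results : List ((List (String × List (String × List Int))) × (List (String × List (String × List Int))))) :
    ∀ (a b : PySem.Dict String (PySem.Dict String (List Int))),
    results.foldl (fun st p => (mergeA_one st.1 p.1, mergeA_one st.2 p.2)) (a, b)
    = ((results.map (fun p => p.1)).foldl mergeA_one a,
       (results.map (fun p => p.2)).foldl mergeA_one b) := by
  induction results with
  | nil => intro a b; rfl
  | cons p rest ih =>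
    intro a b
    rw [List.foldl_cons, List.map_cons, List.map_cons, List.foldl_cons, List.foldl_cons]
    exact ih _ _

-- Folding A's per-index merge over a list of indices is the clean pair-step fold
-- over the flattened pair stream (nodup keys are preserved throughout).
theorem foldA_eq_stepPair (idxs : List (List (String × List (String × List Int)))) :
    ∀ (acc : PySem.Dict String (PySem.Dict String (List Int))), acc.keys.Nodup →
    idxs.foldl mergeA_one acc = (idxs.flatMap (fun idx => idx)).foldl stepPair acc := by
  induction idxs with
  | nil => intro acc _; rfl
  | cons idx rest ih =>
    intro acc hnd
    rw [List.foldl_cons, List.flatMap_cons, List.foldl_append, oneA_eq idx acc hnd]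
    exact ih _ (PySem.Dict.nodup_keys_foldl_insert_key idx (fun kf => kf.1)
      (fun d kf => foldFiles (d.getD kf.1 PySem.Dict.empty) kf.2) acc hnd)

-- ===== VERDICT (by name: the statement is the Claim_ definition above) =====
theorem merge_indices_spec : Claim_equal_merge_indices := by
  intro results _
  unfold Spec_merge_indices merge_indices merge_indices_alt
  rw [fold_results_split results PySem.Dict.empty PySem.Dict.empty,
      foldA_eq_stepPair (results.map (fun p => p.1)) PySem.Dict.empty PySem.Dict.nodup_keys_empty,
      foldA_eq_stepPair (results.map (fun p => p.2)) PySem.Dict.empty PySem.Dict.nodup_keys_empty]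
  exact congrArg₂ Prod.mk (side_eq (results.map (fun p => p.1)))
    (side_eq (results.map (fun p => p.2)))
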